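-- pv_equiv track=rewrite | github.com/vsemp/software_discovery | CloudArticle/vladimir/vladimir/code/script_v2.py | transform_anthony_intersection
-- ===== SOURCE A (Python) =====
-- def transform_anthony_intersection(data):
--     res = dict()
--     for label in data:
--         for filename in data[label]:
--             if label not in res:
--                 res[label] = data[label][filename]
--                 continue
--             res[label] = res[label].intersection(data[label][filename])
--     return res
-- ===== SOURCE B (Python) =====
-- def transform_anthony_intersection(data):
--     # Different algorithm: per label, count each element's occurrences across
--     # all filename sets once, then keep the elements of the first set whose
--     # count equals the number of sets (i.e. that occur in every set).
--     res = {}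
--     for label, files in data.items():
--         sets = list(files.values())
--         if not sets:
--             continue
--         cnt = {}
--         for s in sets:
--             for x in s:
--                 cnt[x] = cnt.get(x, 0) + 1
--         res[label] = {x for x in sets[0] if cnt[x] == len(sets)}
--     return res
-- ===== Notes on version B (the rewrite author's own statement) =====
-- stated objective: alternative
-- what changed: Replaces the iterated set.intersection with its sentinel 'label not in res' accumulator by a per-label occurrence counter: one counting pass over all filename sets, then a single filter of the first set keeping elements whose count equals the number of sets.
import Mathlib
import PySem

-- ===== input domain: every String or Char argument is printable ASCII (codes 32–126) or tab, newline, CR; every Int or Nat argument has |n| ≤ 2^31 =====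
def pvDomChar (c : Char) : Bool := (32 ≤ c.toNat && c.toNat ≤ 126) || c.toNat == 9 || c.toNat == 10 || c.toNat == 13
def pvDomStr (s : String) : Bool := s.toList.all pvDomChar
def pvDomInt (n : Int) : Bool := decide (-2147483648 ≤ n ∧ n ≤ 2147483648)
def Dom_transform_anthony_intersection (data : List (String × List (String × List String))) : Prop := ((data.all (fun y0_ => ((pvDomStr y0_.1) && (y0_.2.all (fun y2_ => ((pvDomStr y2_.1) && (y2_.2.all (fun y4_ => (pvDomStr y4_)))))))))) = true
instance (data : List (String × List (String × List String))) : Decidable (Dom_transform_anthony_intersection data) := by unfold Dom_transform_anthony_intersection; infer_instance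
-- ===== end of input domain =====

-- B replaces the iterated set.intersection (with its 'label not in res' sentinel) by a
-- per-label occurrence counter and one filter of the first set (objective: alternative).

-- ===== PORT A =====
-- inner loop of A ('for filename in data[label]: …'), values read from the pair
-- (equals Python's data[label][filename] lookup under Pre_'s distinct filename keys)
def pvAStep (res : PySem.Dict String (List String)) (p : String × List (String × List String)) : PySem.Dict String (List String) :=
  p.2.foldl (fun r q =>
    if PySem.Dict.contains r p.1 = false then
      PySem.Dict.insert r p.1 q.2
    else
      PySem.Dict.insert r p.1 (PySem.Set.inter (PySem.Dict.getD r p.1 []) q.2)) res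

def transform_anthony_intersection (data : List (String × List (String × List String))) : List (String × List String) :=
  (data.foldl pvAStep PySem.Dict.empty).items

-- ===== PORT B =====
-- 'cnt' loop of B: count occurrences of every element across all the filename sets
def pvCountAll (sets : List (List String)) : PySem.Dict String Int :=
  sets.foldl (fun cnt s =>
    s.foldl (fun cnt x => PySem.Dict.insert cnt x (PySem.Dict.getD cnt x 0 + 1)) cnt) PySem.Dict.empty

-- body of B's 'for label, files in data.items()' loop
def pvBStep (res : PySem.Dict String (List String)) (p : String × List (String × List String)) : PySem.Dict String (List String) :=
  match p.2.map (·.2) with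
  | [] => res
  | s0 :: rest =>
    let cnt := pvCountAll (s0 :: rest)
    PySem.Dict.insert res p.1
      (PySem.Set.ofList (s0.filter (fun x => PySem.Dict.getD cnt x 0 == ((s0 :: rest).length : Int))))

def transform_anthony_intersection_alt (data : List (String × List (String × List String))) : List (String × List String) :=
  (data.foldl pvBStep PySem.Dict.empty).items

-- ===== PRECONDITION & SPEC =====
-- Pre_ only demands that the association list is a valid encoding of A's Python input
-- (a dict of dicts of sets): distinct label keys, distinct filename keys, and no
-- duplicate elements inside a set list; every value decoded from a real Python input
-- satisfies it, so nothing A returns on is lost.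
def Pre_transform_anthony_intersection (data : List (String × List (String × List String))) : Prop :=
  (data.map (·.1)).Nodup ∧ ∀ p ∈ data, (p.2.map (·.1)).Nodup ∧ ∀ q ∈ p.2, q.2.Nodup
instance (data : List (String × List (String × List String))) : Decidable (Pre_transform_anthony_intersection data) := by unfold Pre_transform_anthony_intersection; infer_instance

def pvWitness_transform_anthony_intersection : (List (String × List (String × List String))) :=
  [("a", [("f", ["x", "y"]), ("g", ["y"])])]

def Spec_transform_anthony_intersection (data : List (String × List (String × List String))) (out : List (String × List String)) : Prop := out = transform_anthony_intersection_alt data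
instance (data : List (String × List (String × List String))) (out : List (String × List String)) : Decidable (Spec_transform_anthony_intersection data out) := by unfold Spec_transform_anthony_intersection; infer_instance

-- ===== CLAIM (what is proved, stated in full; the proofs are below) =====
def Claim_equal_transform_anthony_intersection : Prop := ∀ (data : List (String × List (String × List String))), Dom_transform_anthony_intersection data → Pre_transform_anthony_intersection data → Spec_transform_anthony_intersection data (transform_anthony_intersection data)

-- ===== LEMMAS AND PROOFS =====

-- once the label is present, A's inner loop just keeps intersecting the stored set
theorem pvAInner (res : PySem.Dict String (List String)) (lab : String)
    (fs : List (String × List String)) (acc : List String) :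
    fs.foldl (fun r q =>
      if PySem.Dict.contains r lab = false then
        PySem.Dict.insert r lab q.2
      else
        PySem.Dict.insert r lab (PySem.Set.inter (PySem.Dict.getD r lab []) q.2))
      (PySem.Dict.insert res lab acc)
    = PySem.Dict.insert res lab (fs.foldl (fun a q => PySem.Set.inter a q.2) acc) := by
  induction fs generalizing acc with
  | nil => rfl
  | cons q fs ih =>
    simp only [List.foldl_cons, PySem.Dict.contains_insert_self, PySem.Dict.getD_insert_self,
      PySem.Dict.insert_insert_self]
    exact ih (PySem.Set.inter acc q.2)

theorem pvFilterFilter (xs : List String) (p q : String → Bool) :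
    (xs.filter p).filter q = xs.filter (fun x => p x && q x) := by
  rw [List.filter_filter]
  exact List.filter_congr (fun x _ => Bool.and_comm (q x) (p x))

-- the iterated intersection is one filter of the first set
theorem pvFoldlInter (ss : List (List String)) (s0 : List String) :
    ss.foldl (fun a s => PySem.Set.inter a s) s0
    = s0.filter (fun x => ss.all (fun s => PySem.Set.contains s x)) := by
  induction ss generalizing s0 with
  | nil => simp
  | cons s ss ih =>
    show ss.foldl _ (PySem.Set.inter s0 s) = _
    rw [ih]
    show (s0.filter _).filter _ = _
    rw [pvFilterFilter]
    exact List.filter_congr (fun x _ => by simp [List.all_cons])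

theorem pvCountAll_getD (ss : List (List String)) (x : String) :
    (pvCountAll ss).getD x 0 = (ss.flatten.count x : Int) := by
  unfold pvCountAll
  rw [← List.foldl_flatten, PySem.Dict.foldl_insert_getD_add_one_eq_counter,
    PySem.Dict.getD_counter]

theorem pvFlattenCountLe (x : String) (ss : List (List String)) (h : ∀ s ∈ ss, s.Nodup) :
    ss.flatten.count x ≤ ss.length := by
  induction ss with
  | nil => simp
  | cons s ss ih =>
    have h1 : s.count x ≤ 1 := List.nodup_iff_count_le_one.mp (h s (by simp)) x
    have h2 := ih (fun t ht => h t (by simp [ht]))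
    simp only [List.flatten_cons, List.count_append, List.length_cons]
    omega

theorem pvFlattenCountEqIff (x : String) (ss : List (List String)) (h : ∀ s ∈ ss, s.Nodup) :
    (ss.flatten.count x = ss.length ↔ ∀ s ∈ ss, x ∈ s) := by
  induction ss with
  | nil => simp
  | cons s ss ih =>
    have hs := h s (by simp)
    have htl : ∀ t ∈ ss, t.Nodup := fun t ht => h t (by simp [ht])
    have h1 : s.count x ≤ 1 := List.nodup_iff_count_le_one.mp hs x
    have h2 := pvFlattenCountLe x ss htl
    have hmem : x ∈ s ↔ s.count x = 1 := by
      constructor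
      · intro hx
        have := List.count_pos_iff.mpr hx
        omega
      · intro hc
        exact List.count_pos_iff.mp (by omega)
    simp only [List.flatten_cons, List.count_append, List.length_cons, List.forall_mem_cons,
      hmem, ← ih htl]
    omega

-- one label's value computed by A equals the one computed by B
theorem pvStepEq (res : PySem.Dict String (List String)) (p : String × List (String × List String))
    (hres : PySem.Dict.contains res p.1 = false)
    (hnod : ∀ q ∈ p.2, q.2.Nodup) :
    pvAStep res p = pvBStep res p := by
  unfold pvAStep pvBStep
  cases hf : p.2 with
  | nil => rfl
  | cons f0 fs =>
    simp only [List.foldl_cons, List.map_cons]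
    rw [if_pos hres, pvAInner res p.1 fs f0.2]
    show PySem.Dict.insert res p.1 (fs.foldl (fun a q => PySem.Set.inter a q.2) f0.2)
      = PySem.Dict.insert res p.1 (PySem.Set.ofList (f0.2.filter (fun x =>
          PySem.Dict.getD (pvCountAll (f0.2 :: fs.map (·.2))) x 0
            == ((f0.2 :: fs.map (·.2)).length : Int))))
    congr 1
    have hs0 : f0.2.Nodup := hnod f0 (by simp [hf])
    have hrest : ∀ s ∈ fs.map (·.2), s.Nodup := by
      intro s hs
      obtain ⟨q, hq, rfl⟩ := List.mem_map.mp hs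
      exact hnod q (by simp [hf, hq])
    -- A's value as a filter of the first set
    have hA := pvFoldlInter (fs.map (·.2)) f0.2
    rw [List.foldl_map] at hA
    rw [hA]
    -- B's filter condition agrees on the members of the first set
    have hcond : ∀ x ∈ f0.2,
        (PySem.Dict.getD (pvCountAll (f0.2 :: fs.map (·.2))) x 0
          == ((f0.2 :: fs.map (·.2)).length : Int))
        = (fs.map (·.2)).all (fun s => PySem.Set.contains s x) := by
      intro x hx
      rw [pvCountAll_getD]
      have hx1 : f0.2.count x = 1 := by
        have hle : f0.2.count x ≤ 1 := List.nodup_iff_count_le_one.mp hs0 x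
        have hpos := List.count_pos_iff.mpr hx
        omega
      have hiff := pvFlattenCountEqIff x (fs.map (·.2)) hrest
      simp only [List.flatten_cons, List.count_append, List.length_cons, hx1]
      rw [Bool.eq_iff_iff]
      simp only [beq_iff_eq, List.all_eq_true, PySem.Set.contains_iff]
      rw [← hiff]
      omega
    rw [List.filter_congr hcond]
    exact (PySem.Set.ofList_eq_self_of_nodup _ (hs0.filter _)).symm

-- the two folds agree as long as the upcoming labels are not yet in res
theorem pvMain (data : List (String × List (String × List String)))
    (res : PySem.Dict String (List String))
    (hnd : (data.map (·.1)).Nodup)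
    (hfresh : ∀ p ∈ data, PySem.Dict.contains res p.1 = false)
    (hsets : ∀ p ∈ data, ∀ q ∈ p.2, q.2.Nodup) :
    data.foldl pvAStep res = data.foldl pvBStep res := by
  induction data generalizing res with
  | nil => rfl
  | cons p ps ih =>
    have hstep := pvStepEq res p (hfresh p (by simp)) (hsets p (by simp))
    have hnd' : (p.1 :: ps.map (·.1)).Nodup := hnd
    have hhead : ∀ r ∈ ps, r.1 ≠ p.1 := fun r hr heq =>
      (List.nodup_cons.mp hnd').1 (heq ▸ List.mem_map.mpr ⟨r, hr, rfl⟩)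
    have hfresh' : ∀ r ∈ ps, PySem.Dict.contains (pvBStep res p) r.1 = false := by
      intro r hr
      unfold pvBStep
      cases hf : p.2.map (·.2) with
      | nil => exact hfresh r (by simp [hr])
      | cons s0 rest =>
        rw [PySem.Dict.contains_insert]
        simp only [Bool.or_eq_false_iff]
        exact ⟨beq_eq_false_iff_ne.mpr (hhead r hr), hfresh r (by simp [hr])⟩
    simp only [List.foldl_cons, hstep]
    exact ih (pvBStep res p) (List.nodup_cons.mp hnd').2
      hfresh' (fun r hr => hsets r (by simp [hr]))

-- ===== VERDICT (by name: the statement is the Claim_ definition above) =====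
theorem transform_anthony_intersection_spec : Claim_equal_transform_anthony_intersection := by
  intro data _ hpre
  unfold Spec_transform_anthony_intersection transform_anthony_intersection
    transform_anthony_intersection_alt
  rw [pvMain data PySem.Dict.empty hpre.1
    (fun p _ => PySem.Dict.contains_empty p.1)
    (fun p hp q hq => (hpre.2 p hp).2 q hq)]
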